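-- pv_equiv track=rewrite | github.com/Simon-Krzysiak/python-learning | CodeSignal-solutions/Core/Numbers Grouping.py | numbersGrouping
-- ===== SOURCE A (Python) =====
-- def numbersGrouping(a):
--     groups = dict()
--
--     for number in a:
--         group, rem = divmod(number, 10**4)
--         if rem == 0:
--             group -= 1
--         groups[group] = None
--
--     return len(groups) + len(a)
-- ===== SOURCE B (Python) =====
-- def numbersGrouping(a):
--     keys = sorted((n - 1) // 10**4 for n in a)
--     distinct = 0
--     prev = None
--     for k in keys:
--         if prev is None or k != prev:
--             distinct += 1
--         prev = k
--     return distinct + len(a)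
-- ===== Notes on version B (the rewrite author's own statement) =====
-- stated objective: alternative
-- what changed: Replaces the dict-of-groups with a closed-form group key (n-1)//10**4 per element, then sorts the keys and counts distinct groups by a single predecessor-comparison scan instead of hashing.
import Mathlib
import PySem

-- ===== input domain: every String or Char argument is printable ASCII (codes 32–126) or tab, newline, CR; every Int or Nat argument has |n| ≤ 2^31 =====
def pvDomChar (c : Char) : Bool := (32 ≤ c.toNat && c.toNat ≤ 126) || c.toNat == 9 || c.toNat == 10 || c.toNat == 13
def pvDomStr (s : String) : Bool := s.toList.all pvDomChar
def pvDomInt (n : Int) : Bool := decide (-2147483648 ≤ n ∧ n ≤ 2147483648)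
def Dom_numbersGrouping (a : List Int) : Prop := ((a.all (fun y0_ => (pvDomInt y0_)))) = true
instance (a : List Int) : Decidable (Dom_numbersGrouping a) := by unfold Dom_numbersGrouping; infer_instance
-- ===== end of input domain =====

-- B replaces A's dict of group keys by a closed-form key per element, sorts the keys and
-- counts distinct groups with one predecessor-comparison scan (alternative algorithm, same result).

-- ===== PORT A =====
def numbersGrouping (a : List Int) : Int :=
  let groups : PySem.Dict Int (Option Unit) :=
    a.foldl (fun d number =>
      -- divmod(number, 10**4): divisor is the nonzero literal 10000, so floordiv/mod are exact
      let group := PySem.Int.floordiv number 10000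
      let rem := PySem.Int.mod number 10000
      let group := if rem = 0 then group - 1 else group
      d.insert group none) PySem.Dict.empty
  (groups.size : Int) + (a.length : Int)

-- ===== PORT B =====
def numbersGrouping_alt (a : List Int) : Int :=
  let keys := PySem.List.sorted (a.map (fun n => PySem.Int.floordiv (n - 1) 10000)) (fun x => x) false
  let st := keys.foldl (fun (st : Option Int × Int) k =>
      (some k, if st.1 ≠ some k then st.2 + 1 else st.2)) (none, 0)
  st.2 + (a.length : Int)

-- ===== PRECONDITION & SPEC =====
def Spec_numbersGrouping (a : List Int) (out : Int) : Prop := out = numbersGrouping_alt a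
instance (a : List Int) (out : Int) : Decidable (Spec_numbersGrouping a out) := by unfold Spec_numbersGrouping; infer_instance

-- ===== CLAIM (what is proved, stated in full; the proofs are below) =====
def Claim_equal_numbersGrouping : Prop := ∀ (a : List Int), Dom_numbersGrouping a → Spec_numbersGrouping a (numbersGrouping a)

-- ===== LEMMAS AND PROOFS =====

-- A's per-element group key equals B's closed form (n-1)//10000
theorem pvKey_eq (n : Int) :
    (if PySem.Int.mod n 10000 = 0 then PySem.Int.floordiv n 10000 - 1 else PySem.Int.floordiv n 10000)
      = PySem.Int.floordiv (n - 1) 10000 := by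
  rw [PySem.Int.floordiv_eq_ediv_of_pos (a := n) (by norm_num),
      PySem.Int.floordiv_eq_ediv_of_pos (a := n - 1) (by norm_num),
      PySem.Int.mod_eq_emod_of_pos (a := n) (by norm_num)]
  split_ifs with h <;> omega

-- the recursion carried by B's fold, isolated
def pvCnt : Option Int → List Int → Int
  | _, [] => 0
  | prev, k :: ks => (if prev ≠ some k then 1 else 0) + pvCnt (some k) ks

theorem pvFold_cnt (ks : List Int) : ∀ (prev : Option Int) (c : Int),
    (ks.foldl (fun (st : Option Int × Int) k =>
      (some k, if st.1 ≠ some k then st.2 + 1 else st.2)) (prev, c)).2 = c + pvCnt prev ks := by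
  induction ks with
  | nil => intro prev c; simp [pvCnt]
  | cons k ks ih =>
    intro prev c
    simp only [List.foldl_cons, pvCnt, ih]
    split_ifs <;> ring

theorem pvInsert_card (k : Int) (s : Finset Int) :
    (insert k s).card = (s.erase k).card + 1 := by
  have h : insert k s = insert k (s.erase k) := by
    ext x; simp [Finset.mem_erase]; tauto
  rw [h, Finset.card_insert_of_notMem (Finset.notMem_erase _ _)]

-- on a nondecreasing list, the predecessor-comparison count is the number of distinct elements
theorem pvCnt_sorted : ∀ (ks : List Int), ks.Pairwise (· ≤ ·) →
    (pvCnt none ks = ks.toFinset.card) ∧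
    (∀ p : Int, (∀ x ∈ ks, p ≤ x) → pvCnt (some p) ks = (ks.toFinset.erase p).card) := by
  intro ks
  induction ks with
  | nil => intro _; simp [pvCnt]
  | cons k ks ih =>
    intro h
    rw [List.pairwise_cons] at h
    obtain ⟨hk, hks⟩ := h
    obtain ⟨_, ihp⟩ := ih hks
    have hsome : pvCnt (some k) ks = (ks.toFinset.erase k).card := ihp k hk
    constructor
    · simp only [pvCnt, List.toFinset_cons]
      rw [hsome, pvInsert_card]
      simp; ring
    · intro p hp
      by_cases hpk : p = k
      · subst hpk
        simp only [pvCnt, List.toFinset_cons, Finset.erase_insert_eq_erase]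
        rw [hsome]; simp
      · have hplt : p < k := lt_of_le_of_ne (hp k (by simp)) hpk
        have hpnot : p ∉ (k :: ks).toFinset := by
          simp only [List.mem_toFinset, List.mem_cons]
          rintro (rfl | hmem)
          · exact hpk rfl
          · exact absurd (hk p hmem) (by omega)
        rw [Finset.erase_eq_of_notMem hpnot]
        simp only [pvCnt, List.toFinset_cons]
        rw [hsome, pvInsert_card]
        simp [hpk]; ring

theorem pvSet_len (m : List Int) : ((PySem.Set.ofList m).length : Int) = (m.toFinset.card : Int) := by
  have hnd : (PySem.Set.ofList m).Nodup := PySem.Set.nodup_ofList m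
  have hfin : (PySem.Set.ofList m).toFinset = m.toFinset := by
    ext x; simp [List.mem_toFinset, PySem.Set.mem_ofList]
  rw [← List.toFinset_card_of_nodup hnd, hfin]

-- ===== VERDICT (by name: the statement is the Claim_ definition above) =====
theorem numbersGrouping_spec : Claim_equal_numbersGrouping := by
  unfold Claim_equal_numbersGrouping
  intro a _
  unfold Spec_numbersGrouping numbersGrouping numbersGrouping_alt
  simp only []
  -- A side: the dict's keys are the deduplicated key list
  have hkeys :
      (a.foldl (fun (d : PySem.Dict Int (Option Unit)) number =>
        let group := PySem.Int.floordiv number 10000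
        let rem := PySem.Int.mod number 10000
        let group := if rem = 0 then group - 1 else group
        d.insert group none) PySem.Dict.empty).keys
      = PySem.Set.ofList (a.map (fun n => PySem.Int.floordiv (n - 1) 10000)) := by
    have := PySem.Dict.keys_foldl_insert_key (l := a)
      (key := fun n => if PySem.Int.mod n 10000 = 0 then PySem.Int.floordiv n 10000 - 1
                       else PySem.Int.floordiv n 10000)
      (f := fun _ _ => (none : Option Unit)) (d := PySem.Dict.empty)
    simp only [PySem.Dict.keys_empty, PySem.Set.update_nil_left] at this
    rw [show (a.map (fun n => PySem.Int.floordiv (n - 1) 10000))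
          = (a.map (fun n => if PySem.Int.mod n 10000 = 0 then PySem.Int.floordiv n 10000 - 1
                             else PySem.Int.floordiv n 10000)) from
        List.map_congr_left (fun n _ => (pvKey_eq n).symm)]
    rw [← this]
  have hsize :
      ((a.foldl (fun (d : PySem.Dict Int (Option Unit)) number =>
        let group := PySem.Int.floordiv number 10000
        let rem := PySem.Int.mod number 10000
        let group := if rem = 0 then group - 1 else group
        d.insert group none) PySem.Dict.empty).size : Int)
      = ((a.map (fun n => PySem.Int.floordiv (n - 1) 10000)).toFinset.card : Int) := by
    have hlen : (a.foldl (fun (d : PySem.Dict Int (Option Unit)) number =>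
        let group := PySem.Int.floordiv number 10000
        let rem := PySem.Int.mod number 10000
        let group := if rem = 0 then group - 1 else group
        d.insert group none) PySem.Dict.empty).size
        = (PySem.Set.ofList (a.map (fun n => PySem.Int.floordiv (n - 1) 10000))).length := by
      rw [← hkeys]; simp [PySem.Dict.keys, PySem.Dict.size]
    rw [hlen, pvSet_len]
  -- B side: the fold over the sorted keys counts the distinct keys
  set m := a.map (fun n => PySem.Int.floordiv (n - 1) 10000) with hm
  set s := PySem.List.sorted m (fun x => x) false with hs
  have hpair : s.Pairwise (· ≤ ·) := by
    have := PySem.List.sorted_pairwise (xs := m) (key := fun x => (x : Int))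
    simpa [hs] using this
  have hperm : s.Perm m := PySem.List.sorted_perm ..
  have hfin : s.toFinset = m.toFinset := by ext x; simp [List.mem_toFinset, hperm.mem_iff]
  rw [hsize, pvFold_cnt, (pvCnt_sorted s hpair).1, hfin]
  ring
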